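-- pv_equiv track=rewrite | github.com/jskh1855/codingProblems | codility/Peaks.py | solution
-- ===== SOURCE A (Python) =====
-- def solution(A):
--
--     counts = 0
--     peaks = []
--
--     for i in range(1, len(A)-1):
--
--         if A[i] > A[i-1] and A[i] > A[i+1]:
--
--             counts += 1
--             peaks.append(i)
--
--     if len(peaks) == 0:
--
--         return 0
--
--     block = len(A) // len(peaks)
--
--     answer = 1
--
--     while block < len(A):
--
--         if len(A) % block != 0:
--
--             block += 1
--             continue
--
--         end_of_block = block-1
--         index = 0
--         has_peak = False
--
--         while index < len(peaks):
--
--             if peaks[index] <= end_of_block: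
--
--                 has_peak = True
--                 index += 1
--
--             else:
--                 if has_peak:
--                     end_of_block += block
--                     has_peak = False
--
--                 else:
--                     break
--
--         else:
--
--             answer = len(A) // block
--             break
--
--     return answer
-- ===== SOURCE B (Python) =====
-- def solution(A):
--     n = len(A)
--     # prefix counts of peaks: pref[j] = number of peaks at indices < j
--     pref = [0]
--     c = 0
--     for i in range(n):
--         if 0 < i < n - 1 and A[i - 1] < A[i] > A[i + 1]:
--             c += 1
--         pref.append(c)
--     p = c
--     if p == 0:
--         return 0
--     m = n // p
--     # smallest divisor b of n with m <= b < n, found via sqrt enumeration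
--     b = None
--     d = 1
--     while d * d <= n:
--         if n % d == 0:
--             if m <= d < n and (b is None or d < b):
--                 b = d
--             e = n // d
--             if m <= e < n and (b is None or e < b):
--                 b = e
--         d += 1
--     if b is None:
--         return 1
--     # every block up to (and including) the last peak's block must contain a peak
--     ok = True
--     for j in range(n // b):
--         lo = pref[j * b]
--         if lo == p:
--             break
--         if pref[j * b + b] == lo:
--             ok = False
--             break
--     return n // b if ok else 1
-- ===== Notes on version B (the rewrite author's own statement) =====
-- stated objective: alternative
-- what changed: B drops A's peak-index list and block-walking automaton entirely: it builds a prefix-sum array of peak counts, finds the single relevant block size (the smallest divisor of n in [n//p, n)) by sqrt-bounded divisor-pair enumeration instead of A's linear upward scan, and validates it by comparing prefix counts at block boundaries until the count saturates; Pre_ excludes the inputs on which A loops forever (a divisor block size whose peak-coverage check fails is retried unchanged).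
import Mathlib
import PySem

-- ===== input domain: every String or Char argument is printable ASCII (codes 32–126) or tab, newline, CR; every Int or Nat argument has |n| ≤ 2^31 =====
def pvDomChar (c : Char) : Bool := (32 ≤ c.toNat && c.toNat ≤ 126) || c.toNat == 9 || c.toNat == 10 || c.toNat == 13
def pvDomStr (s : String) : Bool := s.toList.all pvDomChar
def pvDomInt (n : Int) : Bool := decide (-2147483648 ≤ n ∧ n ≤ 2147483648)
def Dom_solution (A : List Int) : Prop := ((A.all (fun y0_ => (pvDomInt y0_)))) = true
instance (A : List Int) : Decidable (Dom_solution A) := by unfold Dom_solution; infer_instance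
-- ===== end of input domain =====

-- B drops A's peak-index list and block-walking automaton: it builds a prefix-sum array of
-- peak counts, finds the one relevant block size (smallest divisor of n in [n//p, n)) by
-- sqrt-bounded divisor-pair enumeration instead of A's linear upward scan, and validates it
-- by comparing prefix counts at block boundaries.  Pre_ excludes exactly the inputs on which
-- Python A loops forever.

-- ===== PORT A =====
def pvPeaksA (A : List Int) : List Int :=
  (PySem.List.pyRange 1 ((A.length : Int) - 1) 1).foldl
    (fun ps i =>
      if PySem.List.pyGetD A i 0 > PySem.List.pyGetD A (i - 1) 0 ∧
         PySem.List.pyGetD A i 0 > PySem.List.pyGetD A (i + 1) 0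
      then ps ++ [i] else ps) []

-- A's inner `while index < len(peaks)` loop; returns `true` iff it exits normally
-- (i.e. the `else:` clause of Python's while/else would run).
def innerA (block : Int) : Int → Bool → List Int → Bool
  | _, _, [] => true
  | e, hp, q :: rest =>
    if q ≤ e then innerA block e true rest
    else if hp then innerA block (e + block) false (q :: rest)
    else false
termination_by e hp Q => 2 * Q.length + (if hp then 1 else 0)
decreasing_by all_goals simp_all <;> omega

-- A's outer `while block < len(A)` loop.  On the branch where the inner check fails
-- Python retries the SAME block forever (infinite loop); the fuel only makes this port
-- total — Pre_solution excludes those inputs, and elsewhere fuel n+1 is never exhausted.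
def outerA (n : Int) (peaks : List Int) : Nat → Int → Int
  | 0, _ => 1
  | fuel + 1, block =>
    if block < n then
      if PySem.Int.mod n block ≠ 0 then outerA n peaks fuel (block + 1)
      else if innerA block (block - 1) false peaks then PySem.Int.floordiv n block
      else outerA n peaks fuel block
    else 1

def solution (A : List Int) : Int :=
  let peaks := pvPeaksA A
  if peaks.length = 0 then 0
  else outerA (A.length : Int) peaks (A.length + 1)
         (PySem.Int.floordiv (A.length : Int) (peaks.length : Int))

-- ===== PORT B =====
-- the prefix-count pass: returns (pref, c) with pref = [0, …] the running peak counts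
def pvPrefB (A : List Int) : List Int × Int :=
  (List.range A.length).foldl
    (fun s i =>
      let c := if 0 < i ∧ i < A.length - 1 ∧ A.getD (i-1) 0 < A.getD i 0 ∧ A.getD (i+1) 0 < A.getD i 0
               then s.2 + 1 else s.2
      (s.1 ++ [c], c))
    ([0], 0)

-- `if m <= c < n and (b is None or c < b): b = c`
def pvUpdMin (m n : Int) (b : Option Int) (c : Int) : Option Int :=
  if m ≤ c ∧ c < n then
    match b with
    | none => some c
    | some x => if c < x then some c else some x
  else b

-- `while d * d <= n:` divisor-pair loop; fuel only for totality (d exceeds √n after ≤ n steps)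
def pvMinDivB (n m : Int) : Nat → Int → Option Int → Option Int
  | 0, _, b => b
  | f + 1, d, b =>
    if d * d ≤ n then
      let b' := if PySem.Int.mod n d = 0
                then pvUpdMin m n (pvUpdMin m n b d) (PySem.Int.floordiv n d)
                else b
      pvMinDivB n m f (d + 1) b'
    else b

-- `for j in range(n // b): …` with the two breaks
def pvCheckB (pref : List Int) (p b : Int) : List Int → Bool
  | [] => true
  | j :: rest =>
    if PySem.List.pyGetD pref (j * b) 0 = p then true
    else if PySem.List.pyGetD pref (j * b + b) 0 = PySem.List.pyGetD pref (j * b) 0 then false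
    else pvCheckB pref p b rest

def solution_alt (A : List Int) : Int :=
  let n : Int := A.length
  let pc := pvPrefB A
  let p := pc.2
  if p = 0 then 0
  else
    let m := PySem.Int.floordiv n p
    match pvMinDivB n m (A.length + 1) 1 none with
    | none => 1
    | some b =>
      if pvCheckB pc.1 p b (PySem.List.pyRange 0 (PySem.Int.floordiv n b) 1)
      then PySem.Int.floordiv n b else 1

-- ===== PRECONDITION & SPEC =====
-- Spec-level helpers (independent of both ports): the peak positions of A, and the
-- "every block up to the last peak contains a peak" test for block size b.
def pvIsPeak (A : List Int) (i : Nat) : Bool :=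
  decide (A.getD (i - 1) 0 < A.getD i 0) && decide (A.getD (i + 1) 0 < A.getD i 0)

def pvPeaks (A : List Int) : List Nat :=
  (List.range' 1 (A.length - 2)).filter (pvIsPeak A)

def pvPass (A : List Int) (b : Nat) : Bool :=
  ((pvPeaks A).take 1).all (fun q => decide (q < b)) &&
  ((pvPeaks A).zip (pvPeaks A).tail).all (fun xy => decide (xy.2 / b ≤ xy.1 / b + 1))

-- Pre_ excludes exactly the inputs on which Python A never returns: A loops forever iff
-- the SMALLEST block size b in [n // #peaks, n) dividing n fails the peak-coverage check
-- (Python then retries that same block size without incrementing it).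
def Pre_solution (A : List Int) : Prop :=
  pvPeaks A = [] ∨
  ∀ b ∈ List.range A.length,
    (A.length / (pvPeaks A).length ≤ b ∧ A.length % b = 0 ∧
      ∀ b' ∈ List.range b, A.length / (pvPeaks A).length ≤ b' → A.length % b' ≠ 0) →
    pvPass A b = true
instance (A : List Int) : Decidable (Pre_solution A) := by unfold Pre_solution; infer_instance

def pvWitness_solution : List Int := [0, 1, 0, 1, 0, 0]

def Spec_solution (A : List Int) (out : Int) : Prop := out = solution_alt A
instance (A : List Int) (out : Int) : Decidable (Spec_solution A out) := by unfold Spec_solution; infer_instance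

-- ===== CLAIM (what is proved, stated in full; the proofs are below) =====
def Claim_equal_solution : Prop := ∀ (A : List Int), Dom_solution A → Pre_solution A → Spec_solution A (solution A)

-- ===== LEMMAS AND PROOFS =====

-- peak count below j
def pvCnt (A : List Int) (j : Nat) : Nat := (pvPeaks A).countP (fun q => decide (q < j))

theorem pyRange_down (A : List Int) :
    PySem.List.pyRange 1 ((A.length : Int) - 1) 1 = (List.range' 1 (A.length - 2)).map (fun i : Nat => (i : Int)) := by
  rw [PySem.List.pyRange_of_pos _ _ (by norm_num : (0:Int) < 1)]
  simp only [List.range'_eq_map_range, List.map_map]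
  have h : (if (1:Int) < (A.length : Int) - 1 then (((A.length : Int) - 1 - 1 + 1 - 1) / 1).toNat else 0) = A.length - 2 := by
    split <;> omega
  rw [h]
  apply List.map_congr_left
  intro k _
  simp

theorem peak_cond (A : List Int) (i : Nat) (hi : 1 ≤ i) :
    (PySem.List.pyGetD A ((i : Int) - 1) 0 = A.getD (i-1) 0) ∧
    (PySem.List.pyGetD A (i : Int) 0 = A.getD i 0) ∧
    (PySem.List.pyGetD A ((i : Int) + 1) 0 = A.getD (i+1) 0) := by
  refine ⟨?_, PySem.List.pyGetD_natCast A i 0, ?_⟩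
  · rw [show ((i : Int) - 1) = ((i - 1 : Nat) : Int) by omega, PySem.List.pyGetD_natCast]
  · rw [show ((i : Int) + 1) = ((i + 1 : Nat) : Int) by push_cast; ring, PySem.List.pyGetD_natCast]

theorem peaksA_eq (A : List Int) : pvPeaksA A = (pvPeaks A).map (fun i : Nat => (i : Int)) := by
  unfold pvPeaksA
  rw [PySem.List.foldl_append_ite_eq_filter, List.nil_append, pyRange_down, List.filter_map]
  congr 1
  apply List.filter_congr
  intro i hi
  have h1 : 1 ≤ i := (List.mem_range'_1.mp hi).1
  obtain ⟨e1, e2, e3⟩ := peak_cond A i h1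
  simp only [Function.comp_apply, e1, e2, e3, pvIsPeak, gt_iff_lt, Bool.and_comm]
  simp [Bool.and_comm]

theorem innerA_true_of (b : Nat) (hb : 0 < b) :
    ∀ (Q : List Nat) (m : Nat),
      (∀ xy ∈ Q.zip Q.tail, xy.2 / b ≤ xy.1 / b + 1) →
      (∀ q ∈ Q.take 1, q / b ≤ m + 1) →
      innerA (b : Nat) ((((m + 1) * b : Nat) : Int) - 1) true (Q.map (fun q : Nat => (q : Int))) = true := by
  intro Q
  induction Q with
  | nil => intro m _ _; simp [innerA]
  | cons q rest ih =>
    intro m hz hhd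
    have hq : q / b ≤ m + 1 := hhd q (by simp)
    have hz' : ∀ xy ∈ rest.zip rest.tail, xy.2 / b ≤ xy.1 / b + 1 := by
      intro xy hxy
      apply hz
      cases rest with
      | nil => simp at hxy
      | cons q' t =>
        simp only [List.tail_cons] at hxy ⊢
        exact List.mem_cons_of_mem _ hxy
    have hhd' : ∀ q' ∈ rest.take 1, q' / b ≤ q / b + 1 := by
      intro q' hq'
      cases rest with
      | nil => simp at hq'
      | cons q'' t =>
        simp only [List.take_succ_cons, List.take_zero, List.mem_singleton] at hq'
        subst hq'
        exact hz (q, q') (by simp)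
    by_cases h1 : q / b ≤ m
    · have hlt : q < (m + 1) * b := Nat.lt_mul_of_div_lt (by omega) hb
      have hle : (q : Int) ≤ (((m + 1) * b : Nat) : Int) - 1 := by omega
      rw [List.map_cons]
      rw [show innerA (b : Nat) ((((m + 1) * b : Nat) : Int) - 1) true ((q : Int) :: rest.map (fun q : Nat => (q : Int)))
            = innerA (b : Nat) ((((m + 1) * b : Nat) : Int) - 1) true (rest.map (fun q : Nat => (q : Int)))
          by rw [innerA]; rw [if_pos hle]]
      apply ih m hz'
      intro q' hq'
      have := hhd' q' hq'
      omega
    · have h2 : m + 1 ≤ q / b := by omega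
      have hge : (m + 1) * b ≤ q := (Nat.le_div_iff_mul_le hb).mp h2
      have hgt : ¬ ((q : Int) ≤ (((m + 1) * b : Nat) : Int) - 1) := by omega
      have hlt2 : q < (m + 2) * b := Nat.lt_mul_of_div_lt (by omega) hb
      have hle2 : (q : Int) ≤ (((m + 2) * b : Nat) : Int) - 1 := by omega
      have he : ((((m + 1) * b : Nat) : Int) - 1) + ((b : Nat) : Int) = (((m + 2) * b : Nat) : Int) - 1 := by
        push_cast; ring
      rw [List.map_cons]
      rw [show innerA (b : Nat) ((((m + 1) * b : Nat) : Int) - 1) true ((q : Int) :: rest.map (fun q : Nat => (q : Int)))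
            = innerA (b : Nat) (((((m + 1) * b : Nat) : Int) - 1) + ((b : Nat) : Int)) false ((q : Int) :: rest.map (fun q : Nat => (q : Int)))
          by rw [innerA]; rw [if_neg hgt]; simp]
      rw [he]
      rw [show innerA (b : Nat) ((((m + 2) * b : Nat) : Int) - 1) false ((q : Int) :: rest.map (fun q : Nat => (q : Int)))
            = innerA (b : Nat) ((((m + 2) * b : Nat) : Int) - 1) true (rest.map (fun q : Nat => (q : Int)))
          by rw [innerA]; rw [if_pos hle2]]
      have : (m + 2) = (m + 1) + 1 := rfl
      rw [this]
      apply ih (m + 1) hz'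
      intro q' hq'
      have := hhd' q' hq'
      omega

theorem innerA_entry (b : Nat) (hb : 0 < b) (Q : List Nat)
    (hz : ∀ xy ∈ Q.zip Q.tail, xy.2 / b ≤ xy.1 / b + 1)
    (h0 : ∀ q ∈ Q.take 1, q < b) :
    innerA (b : Nat) ((b : Int) - 1) false (Q.map (fun q : Nat => (q : Int))) = true := by
  cases Q with
  | nil => simp [innerA]
  | cons q rest =>
    have hqb : q < b := h0 q (by simp)
    have hle : (q : Int) ≤ (b : Int) - 1 := by omega
    rw [List.map_cons]
    rw [show innerA (b : Nat) ((b : Int) - 1) false ((q : Int) :: rest.map (fun q : Nat => (q : Int)))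
          = innerA (b : Nat) ((b : Int) - 1) true (rest.map (fun q : Nat => (q : Int)))
        by rw [innerA]; rw [if_pos hle]]
    have he : ((b : Int) - 1) = ((((0 + 1) * b : Nat) : Int) - 1) := by push_cast; ring
    rw [he]
    apply innerA_true_of b hb rest 0
    · intro xy hxy
      apply hz
      cases rest with
      | nil => simp at hxy
      | cons q' t =>
        simp only [List.tail_cons] at hxy ⊢
        exact List.mem_cons_of_mem _ hxy
    · intro q' hq'
      cases rest with
      | nil => simp at hq'
      | cons q'' t =>
        simp only [List.take_succ_cons, List.take_zero, List.mem_singleton] at hq'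
        subst hq'
        have hgap : q' / b ≤ q / b + 1 := hz (q, q') (by simp)
        have hq0 : q / b = 0 := Nat.div_eq_of_lt hqb
        omega

theorem outerA_ret (n b0 : Nat) (P' : List Int)
    (hinner : innerA (b0 : Nat) ((b0 : Int) - 1) false P' = true)
    (hdvd : n % b0 = 0) (hb0 : b0 < n) :
    ∀ (fuel : Nat) (blk : Nat), blk ≤ b0 → b0 - blk < fuel →
      (∀ b, blk ≤ b → b < b0 → n % b ≠ 0) →
      outerA (n : Nat) P' fuel (blk : Nat) = ((n / b0 : Nat) : Int) := by
  intro fuel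
  induction fuel with
  | zero => intro blk h1 h2 _; omega
  | succ f ih =>
    intro blk h1 h2 hno
    by_cases hE : blk = b0
    · subst hE
      rw [outerA, if_pos (by exact_mod_cast hb0)]
      rw [PySem.Int.mod_natCast, hdvd]
      simp only [Nat.cast_zero, ne_eq, not_true_eq_false, if_false, hinner, if_true]
      rw [PySem.Int.floordiv_natCast]
    · have hlt : blk < b0 := lt_of_le_of_ne h1 hE
      rw [outerA, if_pos (by exact_mod_cast (by omega : blk < n)), PySem.Int.mod_natCast]
      rw [if_pos (by exact_mod_cast hno blk le_rfl hlt)]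
      rw [show ((blk : Nat) : Int) + 1 = ((blk + 1 : Nat) : Int) by push_cast; ring]
      exact ih (blk + 1) (by omega) (by omega) (fun b hb1 hb2 => hno b (by omega) hb2)

theorem outerA_none (n : Nat) (P' : List Int) :
    ∀ (fuel : Nat) (blk : Nat), (∀ b, blk ≤ b → b < n → n % b ≠ 0) → n - blk < fuel →
      outerA (n : Nat) P' fuel (blk : Nat) = 1 := by
  intro fuel
  induction fuel with
  | zero => intro blk _ h2; omega
  | succ f ih =>
    intro blk hno h2
    by_cases hE : blk < n
    · rw [outerA, if_pos (by exact_mod_cast hE), PySem.Int.mod_natCast]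
      rw [if_pos (by exact_mod_cast hno blk le_rfl hE)]
      rw [show ((blk : Nat) : Int) + 1 = ((blk + 1 : Nat) : Int) by push_cast; ring]
      exact ih (blk + 1) (fun b hb1 hb2 => hno b (by omega) hb2) (by omega)
    · rw [outerA, if_neg (by exact_mod_cast hE)]

-- ---- B-side: the prefix-count pass computes pvCnt ----

theorem mem_pvPeaks (A : List Int) (i : Nat) :
    i ∈ pvPeaks A ↔ (0 < i ∧ i < A.length - 1 ∧ A.getD (i-1) 0 < A.getD i 0 ∧ A.getD (i+1) 0 < A.getD i 0) := by
  unfold pvPeaks pvIsPeak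
  rw [List.mem_filter, List.mem_range'_1]
  constructor
  · rintro ⟨⟨h1, h2⟩, h3⟩
    simp only [Bool.and_eq_true, decide_eq_true_eq] at h3
    exact ⟨by omega, by omega, h3.1, h3.2⟩
  · rintro ⟨h1, h2, h3, h4⟩
    refine ⟨⟨by omega, by omega⟩, ?_⟩
    simp only [Bool.and_eq_true, decide_eq_true_eq]
    exact ⟨h3, h4⟩

theorem nodup_pvPeaks (A : List Int) : (pvPeaks A).Nodup := by
  unfold pvPeaks
  exact List.Nodup.filter _ List.nodup_range'

theorem pairwise_pvPeaks (A : List Int) : (pvPeaks A).Pairwise (· < ·) := by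
  unfold pvPeaks
  exact List.Pairwise.filter _ (List.pairwise_lt_range' 1)

theorem countP_lt_succ (l : List Nat) (hl : l.Nodup) (k : Nat) :
    l.countP (fun q => decide (q < k + 1)) = l.countP (fun q => decide (q < k)) + (if k ∈ l then 1 else 0) := by
  induction l with
  | nil => simp
  | cons a t ih =>
    have ht : t.Nodup := hl.of_cons
    have hna : a ∉ t := (List.nodup_cons.mp hl).1
    rw [List.countP_cons, List.countP_cons, ih ht]
    by_cases hak : a = k
    · subst hak
      simp [hna, Nat.lt_succ_iff]
    · have hmem : (if k ∈ a :: t then (1:Nat) else 0) = (if k ∈ t then 1 else 0) := by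
        by_cases hm : k ∈ t
        · rw [if_pos (List.mem_cons_of_mem _ hm), if_pos hm]
        · rw [if_neg (by
            intro h
            rcases List.mem_cons.mp h with h | h
            · exact hak h.symm
            · exact hm h), if_neg hm]
      rw [hmem]
      simp only [decide_eq_true_eq]
      split_ifs <;> omega

theorem pvCnt_succ (A : List Int) (k : Nat) :
    pvCnt A (k + 1) = pvCnt A k +
      (if 0 < k ∧ k < A.length - 1 ∧ A.getD (k-1) 0 < A.getD k 0 ∧ A.getD (k+1) 0 < A.getD k 0 then 1 else 0) := by
  unfold pvCnt
  rw [countP_lt_succ _ (nodup_pvPeaks A)]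
  congr 1
  by_cases h : 0 < k ∧ k < A.length - 1 ∧ A.getD (k-1) 0 < A.getD k 0 ∧ A.getD (k+1) 0 < A.getD k 0
  · rw [if_pos ((mem_pvPeaks A k).mpr h), if_pos h]
  · rw [if_neg (fun hm => h ((mem_pvPeaks A k).mp hm)), if_neg h]

theorem prefB_fold (A : List Int) :
    ∀ k : Nat,
      (List.range k).foldl
        (fun s i =>
          let c := if 0 < i ∧ i < A.length - 1 ∧ A.getD (i-1) 0 < A.getD i 0 ∧ A.getD (i+1) 0 < A.getD i 0
                   then s.2 + 1 else s.2
          (s.1 ++ [c], c))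
        ([0], 0)
      = ((List.range (k+1)).map (fun j => (pvCnt A j : Int)), (pvCnt A k : Int)) := by
  intro k
  induction k with
  | zero =>
    simp [pvCnt, List.countP_eq_zero]
  | succ k ih =>
    rw [List.range_succ, List.foldl_append, ih]
    simp only [List.foldl_cons, List.foldl_nil]
    have hc : (if 0 < k ∧ k < A.length - 1 ∧ A.getD (k-1) 0 < A.getD k 0 ∧ A.getD (k+1) 0 < A.getD k 0
               then ((pvCnt A k : Nat) : Int) + 1 else ((pvCnt A k : Nat) : Int)) = ((pvCnt A (k+1) : Nat) : Int) := by
      rw [pvCnt_succ]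
      split <;> push_cast <;> ring
    refine Prod.ext ?_ ?_
    · simp only [hc]
      rw [List.range_succ (n := k + 1), List.map_append]
      simp
    · simpa using hc

theorem prefB_spec (A : List Int) :
    pvPrefB A = ((List.range (A.length + 1)).map (fun j => (pvCnt A j : Int)), (pvCnt A A.length : Int)) :=
  prefB_fold A A.length

theorem pvCnt_len (A : List Int) : pvCnt A A.length = (pvPeaks A).length := by
  unfold pvCnt
  rw [List.countP_eq_length]
  intro q hq
  have := (mem_pvPeaks A q).mp hq
  simp only [decide_eq_true_eq]
  omega

-- get into the prefix list
theorem pref_get (A : List Int) (i : Nat) (h : i ≤ A.length) :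
    PySem.List.pyGetD ((List.range (A.length + 1)).map (fun j => (pvCnt A j : Int))) (i : Int) 0 = (pvCnt A i : Int) := by
  rw [PySem.List.pyGetD_natCast]
  rw [List.getD_eq_getElem?_getD, List.getElem?_map, List.getElem?_range (by omega)]
  simp

-- ---- the coverage argument: gap condition ⇒ every block up to the last peak is hit ----

theorem chainHit (b : Nat) :
    ∀ (t : List Nat) (q j : Nat),
      (∀ xy ∈ (q :: t).zip t, xy.2 / b ≤ xy.1 / b + 1) →
      q / b ≤ j → j ≤ ((q :: t).getLast (by simp)) / b →
      ∃ x ∈ q :: t, x / b = j := by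
  intro t
  induction t with
  | nil =>
    intro q j _ h1 h2
    simp only [List.getLast_singleton] at h2
    exact ⟨q, by simp, by omega⟩
  | cons r t' ih =>
    intro q j hz h1 h2
    by_cases he : q / b = j
    · exact ⟨q, by simp, he⟩
    · have h1' : q / b < j := by omega
      have hg : r / b ≤ q / b + 1 := hz (q, r) (by simp)
      have hlast : ((q :: r :: t').getLast (by simp)) = ((r :: t').getLast (by simp)) := by
        rw [List.getLast_cons]
      rw [hlast] at h2
      have hz' : ∀ xy ∈ (r :: t').zip t', xy.2 / b ≤ xy.1 / b + 1 := by
        intro xy hxy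
        exact hz xy (by simpa using Or.inr hxy)
      obtain ⟨x, hx, hxe⟩ := ih r j hz' (by omega) h2
      exact ⟨x, by simpa using Or.inr hx, hxe⟩

theorem le_getLast_of_pairwise :
    ∀ (l : List Nat) (h : l ≠ []), l.Pairwise (· < ·) → ∀ x ∈ l, x ≤ l.getLast h := by
  intro l
  induction l with
  | nil => intro h; simp at h
  | cons a t ih =>
    intro _ hp x hx
    cases t with
    | nil => simp at hx; simp [hx]
    | cons r t' =>
      rw [List.getLast_cons (by simp)]
      rcases List.mem_cons.mp hx with rfl | hx'
      · have : ∀ y ∈ r :: t', x < y := by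
          intro y hy; exact (List.pairwise_cons.mp hp).1 y hy
        have hlast := List.getLast_mem (l := r :: t') (by simp)
        exact le_of_lt (this _ hlast)
      · exact ih (by simp) (List.pairwise_cons.mp hp).2 x hx'

theorem block_cover (A : List Int) (b : Nat) (hb : 0 < b)
    (hpass : pvPass A b = true) (hne : pvPeaks A ≠ []) (j : Nat) :
    (∀ q ∈ pvPeaks A, q < j * b) ∨ (∃ q ∈ pvPeaks A, j * b ≤ q ∧ q < j * b + b) := by
  obtain ⟨q0, t, hQ⟩ := List.exists_cons_of_ne_nil hne
  simp only [pvPass, Bool.and_eq_true, List.all_eq_true, decide_eq_true_eq] at hpass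
  obtain ⟨h1, h2⟩ := hpass
  have hq0 : q0 < b := by
    have := h1 q0 (by rw [hQ]; simp)
    simpa using this
  have hq0b : q0 / b = 0 := Nat.div_eq_of_lt hq0
  set L := (pvPeaks A).getLast hne with hL
  by_cases hj : j ≤ L / b
  · right
    have hz : ∀ xy ∈ (q0 :: t).zip t, xy.2 / b ≤ xy.1 / b + 1 := by
      intro xy hxy
      apply h2
      rw [hQ]
      simpa using hxy
    have hLe : ((q0 :: t).getLast (by simp)) = L := by
      rw [hL]
      congr 1
      rw [hQ]
    obtain ⟨x, hx, hxe⟩ := chainHit b t q0 j hz (by omega) (by rw [hLe]; exact hj)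
    refine ⟨x, by rw [hQ]; exact hx, ?_, ?_⟩
    · exact (Nat.le_div_iff_mul_le hb).mp (le_of_eq hxe.symm)
    · have h1 : x / b < j + 1 := by omega
      have h2 : x < (j + 1) * b := (Nat.div_lt_iff_lt_mul hb).mp h1
      calc x < (j + 1) * b := h2
        _ = j * b + b := by ring
  · left
    intro q hq
    have hqL : q ≤ L := le_getLast_of_pairwise (pvPeaks A) hne (pairwise_pvPeaks A) q hq
    have hLlt : L < (L / b + 1) * b := (Nat.div_lt_iff_lt_mul hb).mp (by omega)
    have hle : (L / b + 1) * b ≤ j * b := Nat.mul_le_mul_right b (by omega)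
    calc q ≤ L := hqL
      _ < (L / b + 1) * b := hLlt
      _ ≤ j * b := hle

-- countP facts used for strict increase across a block with a peak
theorem countP_or_disj (l : List Nat) (p q : Nat → Bool) (h : ∀ x, ¬(p x = true ∧ q x = true)) :
    l.countP (fun x => p x || q x) = l.countP p + l.countP q := by
  induction l with
  | nil => simp
  | cons a t ih =>
    rw [List.countP_cons, List.countP_cons, List.countP_cons, ih]
    by_cases hp : p a = true
    · have hq : ¬ q a = true := fun hq => h a ⟨hp, hq⟩
      simp [hp, hq]; omega
    · by_cases hq : q a = true
      · simp [hp, hq]; omega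
      · simp [hp, hq]

theorem pvCnt_strict (A : List Int) (lo hi q : Nat) (hq : q ∈ pvPeaks A)
    (h1 : lo ≤ q) (h2 : q < hi) : pvCnt A lo < pvCnt A hi := by
  have key : pvCnt A lo + 1 ≤ (pvPeaks A).countP (fun x => decide (x < lo) || decide (x = q)) := by
    rw [countP_or_disj _ _ _ (by intro x; simp; omega)]
    have : 0 < (pvPeaks A).countP (fun x => decide (x = q)) := by
      rw [List.countP_pos_iff]
      exact ⟨q, hq, by simp⟩
    unfold pvCnt
    omega
  have le2 : (pvPeaks A).countP (fun x => decide (x < lo) || decide (x = q)) ≤ pvCnt A hi := by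
    apply List.countP_mono_left
    intro x hx hpx
    simp only [Bool.or_eq_true, decide_eq_true_eq] at hpx ⊢
    omega
  omega

theorem pvCnt_full (A : List Int) (j : Nat) (h : ∀ q ∈ pvPeaks A, q < j) :
    pvCnt A j = (pvPeaks A).length := by
  unfold pvCnt
  rw [List.countP_eq_length]
  intro q hq
  simp only [decide_eq_true_eq]
  exact h q hq

-- cnt never exceeds the number of peaks
theorem pvCnt_le (A : List Int) (j : Nat) : pvCnt A j ≤ (pvPeaks A).length :=
  List.countP_le_length

-- ---- pvCheckB returns true when every block is saturated-or-strict ----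

theorem checkB_true (A : List Int) (b : Nat) (hb : 0 < b)
    (hcond : ∀ j : Nat, pvCnt A (j * b) = (pvPeaks A).length ∨ pvCnt A (j * b) < pvCnt A (j * b + b)) :
    ∀ (js : List Nat), (∀ j ∈ js, j * b + b ≤ A.length) →
      pvCheckB ((List.range (A.length + 1)).map (fun j => (pvCnt A j : Int)))
        ((pvPeaks A).length : Int) (b : Int) (js.map (fun j : Nat => (j : Int))) = true := by
  intro js
  induction js with
  | nil => intro _; simp [pvCheckB]
  | cons j rest ih =>
    intro hbound
    have hjb : j * b + b ≤ A.length := hbound j (by simp)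
    have e1 : (j : Int) * (b : Int) = ((j * b : Nat) : Int) := by push_cast; ring
    have e2 : (j : Int) * (b : Int) + (b : Int) = ((j * b + b : Nat) : Int) := by push_cast; ring
    rw [List.map_cons, pvCheckB, e2, e1, pref_get A (j * b) (by omega), pref_get A (j * b + b) (by omega)]
    rcases hcond j with hfull | hstrict
    · rw [if_pos (by exact_mod_cast hfull)]
    · have hne : ((pvCnt A (j * b) : Nat) : Int) ≠ ((pvPeaks A).length : Int) := by
        have := pvCnt_le A (j * b)
        have : pvCnt A (j * b) < (pvPeaks A).length := by
          have := pvCnt_le A (j * b + b)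
          omega
        exact_mod_cast Nat.ne_of_lt this
      rw [if_neg hne, if_neg (by exact_mod_cast Nat.ne_of_gt hstrict)]
      exact ih (fun j' hj' => hbound j' (by simp [hj']))

-- ---- the sqrt divisor enumeration ----

def pvCandN (n dN : Nat) : List Nat :=
  (List.range' dN (n + 1 - dN)).flatMap
    (fun d => if d * d ≤ n ∧ n % d = 0 then [d, n / d] else [])

theorem candN_cons (n dN : Nat) (h : dN ≤ n) :
    pvCandN n dN = (if dN * dN ≤ n ∧ n % dN = 0 then [dN, n / dN] else []) ++ pvCandN n (dN + 1) := by
  unfold pvCandN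
  rw [show n + 1 - dN = (n - dN) + 1 by omega, List.range'_succ, List.flatMap_cons,
      show dN + 1 = dN + 1 from rfl, show n + 1 - (dN + 1) = n - dN by omega]

theorem candN_nil (n dN : Nat) (h : ¬ dN * dN ≤ n) (h1 : 1 ≤ dN) : pvCandN n dN = [] := by
  unfold pvCandN
  rw [List.flatMap_eq_nil_iff]
  intro d hd
  have hdN : dN ≤ d := (List.mem_range'_1.mp hd).1
  have : ¬ d * d ≤ n := by
    intro hc
    exact h (le_trans (Nat.mul_le_mul hdN hdN) hc)
  rw [if_neg (by tauto)]

theorem minDivB_eq_fold (n m : Nat) :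
    ∀ (f dN : Nat) (b : Option Int), 1 ≤ dN → n < f + dN →
      pvMinDivB (n : Int) (m : Int) f (dN : Int) b
        = ((pvCandN n dN).map (fun x : Nat => (x : Int))).foldl (pvUpdMin (m : Int) (n : Int)) b := by
  intro f
  induction f with
  | zero =>
    intro dN b h1 h2
    have : n + 1 - dN = 0 := by omega
    unfold pvCandN
    rw [this]
    simp [pvMinDivB]
  | succ f ih =>
    intro dN b h1 h2
    by_cases hdd : dN * dN ≤ n
    · have hdn : dN ≤ n := le_trans (Nat.le_mul_of_pos_left dN h1) hdd
      rw [pvMinDivB, if_pos (by exact_mod_cast hdd)]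
      rw [PySem.Int.mod_natCast]
      rw [candN_cons n dN hdn, List.map_append, List.foldl_append]
      by_cases hm0 : n % dN = 0
      · rw [if_pos (by exact_mod_cast hm0), if_pos ⟨hdd, hm0⟩]
        rw [PySem.Int.floordiv_natCast]
        simp only [List.map_cons, List.map_nil, List.foldl_cons, List.foldl_nil]
        rw [show ((dN : Nat) : Int) + 1 = ((dN + 1 : Nat) : Int) by push_cast; ring]
        exact ih (dN + 1) _ (by omega) (by omega)
      · rw [if_neg (by exact_mod_cast hm0), if_neg (by tauto)]
        simp only [List.map_nil, List.foldl_nil]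
        rw [show ((dN : Nat) : Int) + 1 = ((dN + 1 : Nat) : Int) by push_cast; ring]
        exact ih (dN + 1) _ (by omega) (by omega)
    · rw [pvMinDivB, if_neg (by exact_mod_cast hdd)]
      rw [candN_nil n dN hdd h1]
      simp

theorem min?_merge (x c : Int) (r : List Int) : (x :: c :: r).min? = (min x c :: r).min? := by
  simp [List.min?]

theorem foldl_updMin_min? (m n : Int) :
    ∀ (l : List Int) (b : Option Int),
      l.foldl (pvUpdMin m n) b = (b.toList ++ l.filter (fun x => decide (m ≤ x) && decide (x < n))).min? := by
  intro l
  induction l with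
  | nil =>
    intro b
    cases b <;> simp [List.min?]
  | cons c l ih =>
    intro b
    rw [List.foldl_cons, ih]
    by_cases hw : m ≤ c ∧ c < n
    · rw [List.filter_cons_of_pos (by simp [hw.1, hw.2])]
      cases b with
      | none => simp [pvUpdMin, hw]
      | some x =>
        simp only [pvUpdMin, if_pos hw, Option.toList_some, List.cons_append, List.nil_append]
        rw [min?_merge x c]
        have hmc : min x c = if c < x then c else x := by
          rw [min_def]
          split_ifs <;> omega
        rw [hmc]
        split_ifs <;> simp
    · rw [List.filter_cons_of_neg (by simp only [Bool.and_eq_true, decide_eq_true_eq]; exact fun h => hw h)]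
      have : pvUpdMin m n b c = b := by
        unfold pvUpdMin
        rw [if_neg hw]
      rw [this]

theorem mem_candN_iff (n : Nat) (hn : 1 ≤ n) (x : Nat) : x ∈ pvCandN n 1 ↔ x ∣ n := by
  unfold pvCandN
  rw [List.mem_flatMap]
  constructor
  · rintro ⟨d, hd, hx⟩
    by_cases hc : d * d ≤ n ∧ n % d = 0
    · rw [if_pos hc] at hx
      have hdvd : d ∣ n := Nat.dvd_of_mod_eq_zero hc.2
      rcases List.mem_cons.mp hx with rfl | hx2
      · exact hdvd
      · rcases List.mem_cons.mp hx2 with rfl | hx3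
        · exact Nat.div_dvd_of_dvd hdvd
        · simp at hx3
    · rw [if_neg hc] at hx
      simp at hx
  · intro hdvd
    have hx1 : 1 ≤ x := Nat.pos_of_dvd_of_pos hdvd hn
    have hxn : x ≤ n := Nat.le_of_dvd (by omega) hdvd
    have hco : x * (n / x) = n := Nat.mul_div_cancel' hdvd
    by_cases hs : x * x ≤ n
    · refine ⟨x, ?_, ?_⟩
      · rw [List.mem_range'_1]
        omega
      · rw [if_pos ⟨hs, Nat.mod_eq_zero_of_dvd hdvd⟩]
        simp
    · refine ⟨n / x, ?_, ?_⟩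
      · rw [List.mem_range'_1]
        have h1 : 1 ≤ n / x := Nat.one_le_div_iff (by omega) |>.mpr hxn
        have h2 : n / x ≤ n := Nat.div_le_self n x
        omega
      · have hy : n / x ≤ x := by
          by_contra hc
          push Not at hc
          have h1 : x * (x + 1) ≤ x * (n / x) := Nat.mul_le_mul_left x (by omega)
          rw [hco] at h1
          have h2 : x * x ≤ x * (x + 1) := Nat.mul_le_mul_left x (by omega)
          exact hs (le_trans h2 h1)
        have hd2 : (n / x) * (n / x) ≤ n := by
          calc (n / x) * (n / x) ≤ x * (n / x) := Nat.mul_le_mul_right _ hy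
            _ = n := hco
        have hdvd2 : (n / x) ∣ n := Nat.div_dvd_of_dvd hdvd
        rw [if_pos ⟨hd2, Nat.mod_eq_zero_of_dvd hdvd2⟩]
        have : n / (n / x) = x := Nat.div_div_self hdvd (by omega)
        rw [this]
        simp

-- pyRange 0 k 1 enumerates 0,…,k-1
theorem pyRange0 (k : Nat) :
    PySem.List.pyRange 0 ((k : Nat) : Int) 1 = (List.range k).map (fun i : Nat => (i : Int)) :=
  PySem.List.pyRange_zero_natCast k

-- ===== VERDICT (by name: the statement is the Claim_ definition above) =====
theorem solution_spec : Claim_equal_solution := by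
  intro A _ hpre
  unfold Spec_solution
  by_cases hP : pvPeaks A = []
  · simp [solution, solution_alt, peaksA_eq, prefB_spec, hP, pvCnt]
  · have hn3 : 3 ≤ A.length := by
      by_contra h
      have h0 : A.length - 2 = 0 := by omega
      rw [pvPeaks, h0] at hP
      simp at hP
    have hp0 : 0 < (pvPeaks A).length := List.length_pos_iff.mpr hP
    have hplen : (pvPeaks A).length ≤ A.length - 2 := by
      calc (pvPeaks A).length ≤ (List.range' 1 (A.length - 2)).length := List.length_filter_le _ _
        _ = A.length - 2 := List.length_range' ..
    have hm : 0 < A.length / (pvPeaks A).length := Nat.div_pos (by omega) hp0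
    have hBp : (pvPrefB A).2 = (((pvPeaks A).length : Nat) : Int) := by
      rw [prefB_spec]
      show ((pvCnt A A.length : Nat) : Int) = (((pvPeaks A).length : Nat) : Int)
      rw [pvCnt_len A]
    have hB1 : (pvPrefB A).1 = (List.range (A.length + 1)).map (fun j => (pvCnt A j : Int)) := by
      rw [prefB_spec]
    have hmd := minDivB_eq_fold A.length (A.length / (pvPeaks A).length) (A.length + 1) 1 none (by omega) (by omega)
    rw [foldl_updMin_min?] at hmd
    rw [Nat.cast_one] at hmd
    simp only [Option.toList_none, List.nil_append] at hmd
    have hfd : PySem.Int.floordiv ((A.length : Nat) : Int) (((pvPeaks A).length : Nat) : Int)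
        = ((A.length / (pvPeaks A).length : Nat) : Int) := PySem.Int.floordiv_natCast ..
    by_cases hex : ∃ b, A.length / (pvPeaks A).length ≤ b ∧ b < A.length ∧ A.length % b = 0
    · have hspec := Nat.find_spec hex
      set b0 := Nat.find hex with hb0def
      have hminn : ∀ b, A.length / (pvPeaks A).length ≤ b → b < b0 → A.length % b ≠ 0 := by
        intro b h1 h2 h3
        exact Nat.find_min hex h2 ⟨h1, by omega, h3⟩
      have hpassb0 : pvPass A b0 = true := by
        rcases hpre with h | h
        · exact absurd h hP
        · exact h b0 (List.mem_range.mpr hspec.2.1)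
            ⟨hspec.1, hspec.2.2, fun b' hb' hmle => hminn b' hmle (List.mem_range.mp hb')⟩
      have hb0p : 0 < b0 := by omega
      have hb0dvd : b0 ∣ A.length := Nat.dvd_of_mod_eq_zero hspec.2.2
      -- the divisor-pair enumeration finds exactly b0
      have hsome : (((pvCandN A.length 1).map (fun x : Nat => (x : Int))).filter
            (fun x => decide (((A.length / (pvPeaks A).length : Nat) : Int) ≤ x) && decide (x < ((A.length : Nat) : Int)))).min?
          = some ((b0 : Nat) : Int) := by
        rw [List.min?_eq_some_iff]
        constructor
        · rw [List.mem_filter]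
          refine ⟨List.mem_map_of_mem ((mem_candN_iff A.length (by omega) b0).mpr hb0dvd), ?_⟩
          simp only [Bool.and_eq_true, decide_eq_true_eq]
          exact ⟨by exact_mod_cast hspec.1, by exact_mod_cast hspec.2.1⟩
        · intro y hy
          rw [List.mem_filter] at hy
          obtain ⟨hy1, hy2⟩ := hy
          obtain ⟨x, hx, rfl⟩ := List.mem_map.mp hy1
          simp only [Bool.and_eq_true, decide_eq_true_eq] at hy2
          have hxdvd : x ∣ A.length := (mem_candN_iff A.length (by omega) x).mp hx
          have hfind : b0 ≤ x := Nat.find_min' hex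
            ⟨by exact_mod_cast hy2.1, by exact_mod_cast hy2.2, Nat.mod_eq_zero_of_dvd hxdvd⟩
          exact_mod_cast hfind
      -- the prefix check succeeds
      have hpass' := hpassb0
      simp only [pvPass, Bool.and_eq_true, List.all_eq_true, decide_eq_true_eq] at hpass'
      obtain ⟨h01, hz⟩ := hpass'
      have hinner := innerA_entry b0 hb0p (pvPeaks A) hz h01
      have hcond : ∀ j : Nat, pvCnt A (j * b0) = (pvPeaks A).length ∨ pvCnt A (j * b0) < pvCnt A (j * b0 + b0) := by
        intro j
        rcases block_cover A b0 hb0p hpassb0 hP j with hfull | ⟨q, hq, hq1, hq2⟩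
        · exact Or.inl (pvCnt_full A (j * b0) hfull)
        · exact Or.inr (pvCnt_strict A (j * b0) (j * b0 + b0) q hq hq1 hq2)
      have hchk := checkB_true A b0 hb0p hcond (List.range (A.length / b0))
        (by
          intro j hj
          have hjlt : j < A.length / b0 := List.mem_range.mp hj
          have h1 : (j + 1) * b0 ≤ (A.length / b0) * b0 := Nat.mul_le_mul_right b0 (by omega)
          have hcancel : (A.length / b0) * b0 = A.length := Nat.div_mul_cancel hb0dvd
          have hsm : (j + 1) * b0 = j * b0 + b0 := by ring
          omega)
      have hfd0 : PySem.Int.floordiv ((A.length : Nat) : Int) ((b0 : Nat) : Int)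
          = ((A.length / b0 : Nat) : Int) := PySem.Int.floordiv_natCast ..
      -- assemble B
      have hBval : solution_alt A = ((A.length / b0 : Nat) : Int) := by
        rw [solution_alt]
        simp only [hBp, hB1, hfd]
        rw [if_neg (by exact_mod_cast Nat.ne_of_gt hp0)]
        rw [hmd, hsome]
        simp only [hfd0, pyRange0, hchk, if_true]
      -- assemble A
      have hAval : solution A = ((A.length / b0 : Nat) : Int) := by
        rw [solution]
        simp only [peaksA_eq, List.length_map]
        rw [if_neg (by omega), hfd]
        exact outerA_ret A.length b0 _ hinner hspec.2.2 hspec.2.1 (A.length + 1)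
          (A.length / (pvPeaks A).length) hspec.1 (by omega) hminn
      rw [hAval, hBval]
    · push Not at hex
      have hnone : ∀ b, A.length / (pvPeaks A).length ≤ b → b < A.length → A.length % b ≠ 0 :=
        fun b h1 h2 => hex b h1 h2
      have hnil : (((pvCandN A.length 1).map (fun x : Nat => (x : Int))).filter
            (fun x => decide (((A.length / (pvPeaks A).length : Nat) : Int) ≤ x) && decide (x < ((A.length : Nat) : Int)))) = [] := by
        rw [List.eq_nil_iff_forall_not_mem]
        intro y hy
        rw [List.mem_filter] at hy
        obtain ⟨hy1, hy2⟩ := hy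
        obtain ⟨x, hx, rfl⟩ := List.mem_map.mp hy1
        simp only [Bool.and_eq_true, decide_eq_true_eq] at hy2
        have hxdvd : x ∣ A.length := (mem_candN_iff A.length (by omega) x).mp hx
        exact hnone x (by exact_mod_cast hy2.1) (by exact_mod_cast hy2.2) (Nat.mod_eq_zero_of_dvd hxdvd)
      have hBval : solution_alt A = 1 := by
        rw [solution_alt]
        simp only [hBp, hB1, hfd]
        rw [if_neg (by exact_mod_cast Nat.ne_of_gt hp0)]
        rw [hmd, hnil]
        rfl
      have hAval : solution A = 1 := by
        rw [solution]
        simp only [peaksA_eq, List.length_map]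
        rw [if_neg (by omega), hfd]
        exact outerA_none A.length _ (A.length + 1) (A.length / (pvPeaks A).length) hnone (by omega)
      rw [hAval, hBval]
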